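-- pv_equiv track=rewrite | github.com/klknet/geeks4geeks | datastructure/array/matrix.py | common_elements_2
-- ===== SOURCE A (Python) =====
-- def common_elements_2(matrix):
--     n = len(matrix)
--     h = dict()
--     for i in range(n):
--         h[matrix[0][i]] = 1
--     for i in range(1, n):
--         tmp = dict()
--         for j in range(n):
--             tmp[matrix[i][j]] = 1
--         for e in list(h):
--             if e not in tmp:
--                 del h[e]
--     return list(h)
-- ===== SOURCE B (Python) =====
-- def common_elements_2(matrix):
--     n = len(matrix)
--     cnt = {}
--     for i in range(n):
--         seen = {}
--         for j in range(n):
--             e = matrix[i][j]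
--             if e not in seen:
--                 seen[e] = 1
--                 cnt[e] = cnt.get(e, 0) + 1
--     return [e for e in dict.fromkeys(matrix[0][j] for j in range(n)) if cnt.get(e, 0) == n]
-- ===== Notes on version B (the rewrite author's own statement) =====
-- stated objective: alternative
-- what changed: Instead of maintaining a dict of survivors and deleting keys row by row, B makes one counting pass: a single counter records in how many rows each element occurs (deduplicating within a row via a seen-dict), and the answer is the deduplicated first row filtered by count == n.
import Mathlib
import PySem

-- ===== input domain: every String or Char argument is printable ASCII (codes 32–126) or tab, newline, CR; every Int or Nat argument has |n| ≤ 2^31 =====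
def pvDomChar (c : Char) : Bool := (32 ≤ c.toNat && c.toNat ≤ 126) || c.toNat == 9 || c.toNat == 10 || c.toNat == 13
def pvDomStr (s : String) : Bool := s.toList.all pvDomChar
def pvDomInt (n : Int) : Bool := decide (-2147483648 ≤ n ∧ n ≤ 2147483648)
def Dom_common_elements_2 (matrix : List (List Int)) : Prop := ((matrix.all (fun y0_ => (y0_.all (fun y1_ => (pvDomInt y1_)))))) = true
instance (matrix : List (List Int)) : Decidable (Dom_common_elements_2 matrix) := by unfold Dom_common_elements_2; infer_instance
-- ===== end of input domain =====

-- B replaces A's row-by-row key-deletion from a maintained dict by one counting pass: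
-- a counter of how many rows contain each element, then the deduplicated first row
-- filtered by count == n.


-- ===== PORT A =====
def common_elements_2 (matrix : List (List Int)) : List Int :=
  let n : Int := matrix.length
  let h0 : PySem.Dict Int Int :=
    (PySem.List.pyRange 0 n 1).foldl
      (fun h i => h.insert (PySem.List.pyGetD (PySem.List.pyGetD matrix 0 []) i 0) 1)
      PySem.Dict.empty
  let hF : PySem.Dict Int Int :=
    (PySem.List.pyRange 1 n 1).foldl
      (fun h i =>
        let tmp : PySem.Dict Int Int :=
          (PySem.List.pyRange 0 n 1).foldl
            (fun t j => t.insert (PySem.List.pyGetD (PySem.List.pyGetD matrix i []) j 0) 1)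
            PySem.Dict.empty
        h.keys.foldl (fun h' e => if tmp.contains e then h' else h'.erase e) h)
      h0
  hF.keys

-- ===== PORT B =====
-- the body of B's inner loop: 'e = matrix[i][j]; if e not in seen: seen[e] = 1; cnt[e] = cnt.get(e, 0) + 1'
def pvInnerStep (key : Int → Int) (st : PySem.Dict Int Int × PySem.Dict Int Int) (j : Int) :
    PySem.Dict Int Int × PySem.Dict Int Int :=
  let e := key j
  if st.1.contains e then st
  else (st.1.insert e 1, st.2.insert e (st.2.getD e 0 + 1))

def common_elements_2_alt (matrix : List (List Int)) : List Int :=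
  let n : Int := matrix.length
  let cnt : PySem.Dict Int Int :=
    (PySem.List.pyRange 0 n 1).foldl
      (fun cnt i =>
        ((PySem.List.pyRange 0 n 1).foldl
          (pvInnerStep (fun j => PySem.List.pyGetD (PySem.List.pyGetD matrix i []) j 0))
          (PySem.Dict.empty, cnt)).2)
      PySem.Dict.empty
  let candidates : List Int :=
    PySem.List.dedup ((PySem.List.pyRange 0 n 1).map (fun j =>
      PySem.List.pyGetD (PySem.List.pyGetD matrix 0 []) j 0))
  candidates.filter (fun e => cnt.getD e 0 == n)

-- ===== PRECONDITION & SPEC =====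
-- Pre_ excludes exactly the inputs on which Python raises IndexError: some row
-- shorter than the number of rows n (both programs index every row at columns 0..n-1).
def Pre_common_elements_2 (matrix : List (List Int)) : Prop :=
  ∀ row ∈ matrix, matrix.length ≤ row.length
instance (matrix : List (List Int)) : Decidable (Pre_common_elements_2 matrix) := by
  unfold Pre_common_elements_2; infer_instance
def pvWitness_common_elements_2 : List (List Int) := [[1, 2], [2, 3]]

def Spec_common_elements_2 (matrix : List (List Int)) (out : List Int) : Prop :=
  out = common_elements_2_alt matrix
instance (matrix : List (List Int)) (out : List Int) : Decidable (Spec_common_elements_2 matrix out) := by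
  unfold Spec_common_elements_2; infer_instance

-- ===== CLAIM (what is proved, stated in full; the proofs are below) =====
def Claim_equal_common_elements_2 : Prop :=
  ∀ (matrix : List (List Int)), Dom_common_elements_2 matrix →
    Pre_common_elements_2 matrix →
    Spec_common_elements_2 matrix (common_elements_2 matrix)

-- ===== LEMMAS AND PROOFS =====

-- A side ------------------------------------------------------------------

-- keys of 'tmp[key j] = 1 for j in l' built from the empty dict: the set of the keyed values
theorem keys_insert_one_loop (l : List Int) (key : Int → Int) :
    ((l.foldl (fun t j => t.insert (key j) 1) PySem.Dict.empty : PySem.Dict Int Int)).keys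
      = PySem.Set.ofList (l.map key) := by
  rw [PySem.Dict.keys_foldl_insert_key (f := fun _ _ => (1 : Int))]
  simp [PySem.Dict.keys_empty, PySem.Set.update_nil_left]

-- keys of erase: drop that key
theorem keys_erase (d : PySem.Dict Int Int) (k : Int) :
    (d.erase k).keys = d.keys.filter (fun e => !(e == k)) := by
  show (d.items.filter (fun p => !(p.1 == k))).map (·.1)
      = (d.items.map (·.1)).filter (fun e => !(e == k))
  rw [List.filter_map]
  rfl

-- the 'for e in list(h): if e not in tmp: del h[e]' loop, at the level of keys
theorem keys_erase_loop (tmp : PySem.Dict Int Int) (l : List Int)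
    (d : PySem.Dict Int Int) :
    ((l.foldl (fun h' e => if tmp.contains e then h' else h'.erase e) d)).keys
      = d.keys.filter (fun e => tmp.contains e || !(l.contains e)) := by
  induction l generalizing d with
  | nil => simp
  | cons x l ih =>
    simp only [List.foldl_cons]
    by_cases hx : tmp.contains x
    · rw [if_pos hx, ih]
      apply List.filter_congr
      intro e _
      by_cases hex : e = x
      · subst hex; simp [hx]
      · simp [hex]
    · rw [if_neg hx, ih, keys_erase, List.filter_filter]
      apply List.filter_congr
      intro e _
      by_cases hex : e = x
      · subst hex; simp [hx]
      · simp [hex]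

-- a fold of filters is one filter by the conjunction
theorem foldl_filter_all (L : List Int) (p : Int → Int → Bool) :
    ∀ ks : List Int,
      L.foldl (fun ks i => ks.filter (fun e => p i e)) ks
        = ks.filter (fun e => L.all (fun i => p i e)) := by
  induction L with
  | nil => simp
  | cons i L ih =>
    intro ks
    simp only [List.foldl_cons, ih, List.filter_filter, List.all_cons]
    apply List.filter_congr
    intro e _
    by_cases h : p i e <;> simp [h]

-- membership in the tmp dict of row i is membership in the value list
theorem contains_insert_one_loop (l : List Int) (key : Int → Int) (e : Int) :
    ((l.foldl (fun t j => t.insert (key j) 1) PySem.Dict.empty : PySem.Dict Int Int)).contains e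
      = ((l.map key).contains e) := by
  rw [Bool.eq_iff_iff, PySem.Dict.contains_iff_mem_keys, keys_insert_one_loop]
  simp [PySem.Set.mem_ofList]

-- the outer loop of A, at the level of keys
theorem keys_outer_loop (L c : List Int) (key : Int → Int → Int) :
    ∀ d : PySem.Dict Int Int, d.keys.Nodup →
      ((L.foldl (fun h i =>
          h.keys.foldl (fun h' e =>
            if ((c.foldl (fun t j => t.insert (key i j) 1) PySem.Dict.empty : PySem.Dict Int Int)).contains e
            then h' else h'.erase e) h) d)).keys
        = L.foldl (fun ks i => ks.filter (fun e => (c.map (key i)).contains e)) d.keys := by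
  induction L with
  | nil => intro d _; simp
  | cons i L ih =>
    intro d hnd
    simp only [List.foldl_cons]
    have hstep :
        ((d.keys.foldl (fun h' e =>
            if ((c.foldl (fun t j => t.insert (key i j) 1) PySem.Dict.empty : PySem.Dict Int Int)).contains e
            then h' else h'.erase e) d)).keys
          = d.keys.filter (fun e => (c.map (key i)).contains e) := by
      rw [keys_erase_loop]
      apply List.filter_congr
      intro e he
      simp [contains_insert_one_loop c (key i) e, he]
    rw [ih _ (by rw [hstep]; exact hnd.filter _), hstep]

-- B side ------------------------------------------------------------------

-- B's inner loop: each value of the row increments the counter exactly once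
-- (the 'seen' dict suppresses duplicates within the row)
theorem inner_getD (key : Int → Int) (l : List Int) :
    ∀ (seen cnt : PySem.Dict Int Int) (e : Int),
      ((l.foldl (pvInnerStep key) (seen, cnt)).2).getD e 0
        = cnt.getD e 0
            + (if (l.map key).contains e && !seen.contains e then 1 else 0) := by
  induction l with
  | nil => intro seen cnt e; simp
  | cons j l ih =>
    intro seen cnt e
    simp only [List.foldl_cons, pvInnerStep]
    by_cases hj : seen.contains (key j)
    · rw [if_pos hj, ih]
      by_cases hej : e = key j
      · subst hej; simp [hj]
      · simp only [List.map_cons, List.contains_cons]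
        have : (e == key j) = false := by simp [hej]
        simp [this]
    · rw [if_neg hj]
      simp only [ih]
      by_cases hej : e = key j
      · subst hej
        rw [PySem.Dict.getD_insert]
        simp [hj]
      · rw [PySem.Dict.getD_insert]
        have hb : (e == key j) = false := by simp [hej]
        simp [PySem.Dict.contains_insert, hb, hej]

-- B's outer loop: the final count of e is the number of rows whose values contain e
theorem outer_getD (key : Int → Int → Int) (c : List Int) (L : List Int) :
    ∀ (cnt : PySem.Dict Int Int) (e : Int),
      ((L.foldl (fun cnt i =>
          ((c.foldl (pvInnerStep (fun j => key i j)) (PySem.Dict.empty, cnt)).2)) cnt)).getD e 0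
        = cnt.getD e 0 + ((L.countP (fun i => (c.map (key i)).contains e) : Nat) : Int) := by
  induction L with
  | nil => intro cnt e; simp
  | cons i L ih =>
    intro cnt e
    simp only [List.foldl_cons, List.countP_cons]
    rw [ih, inner_getD]
    simp only [PySem.Dict.contains_empty, Bool.not_false, Bool.and_true]
    by_cases hc : (c.map (key i)).contains e
    · rw [if_pos hc, if_pos hc]
      omega
    · rw [if_neg hc, if_neg hc]
      omega

-- ===== VERDICT (by name: the statement is the Claim_ definition above) =====
theorem common_elements_2_spec : Claim_equal_common_elements_2 := by
  intro matrix _ _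
  show common_elements_2 matrix = common_elements_2_alt matrix
  simp only [common_elements_2, common_elements_2_alt]
  rw [keys_outer_loop (PySem.List.pyRange 1 matrix.length 1) (PySem.List.pyRange 0 matrix.length 1)
        (fun i j => PySem.List.pyGetD (PySem.List.pyGetD matrix i []) j 0) _
        (by rw [keys_insert_one_loop]; exact PySem.Set.nodup_ofList _),
      keys_insert_one_loop, foldl_filter_all, PySem.List.dedup_eq_ofList]
  apply List.filter_congr
  intro e he
  rw [PySem.Set.mem_ofList] at he
  -- from e ∈ row 0 values, the matrix is nonempty
  obtain ⟨j, hj, hje⟩ := List.mem_map.mp he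
  have hjr := (PySem.List.mem_pyRange_one).mp hj
  have hn : (0 : Int) < matrix.length := by omega
  rw [outer_getD (fun i j => PySem.List.pyGetD (PySem.List.pyGetD matrix i []) j 0)]
  rw [PySem.Dict.getD_empty, zero_add]
  rw [Bool.eq_iff_iff]
  simp only [beq_iff_eq]
  have hlen : (PySem.List.pyRange 0 (matrix.length : Int) 1).length = matrix.length := by
    rw [PySem.List.pyRange_zero_natCast]; simp
  have hcons : PySem.List.pyRange 0 (matrix.length : Int) 1
      = 0 :: PySem.List.pyRange 1 (matrix.length : Int) 1 := by
    have h := PySem.List.pyRange_one_cons (a := 0) (b := (matrix.length : Int)) hn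
    norm_num at h
    exact h
  have hgen : ∀ p : Int → Bool, p 0 = true →
      ((((PySem.List.pyRange 0 (matrix.length : Int) 1).countP p : Nat) : Int)
          = (matrix.length : Int)
        ↔ (PySem.List.pyRange 1 (matrix.length : Int) 1).all p = true) := by
    intro p hp
    have hlen1 : (PySem.List.pyRange 1 (matrix.length : Int) 1).length + 1 = matrix.length := by
      rw [hcons] at hlen; simpa using hlen
    rw [hcons, List.countP_cons, hp, if_pos rfl]
    rw [List.all_eq_true, ← List.countP_eq_length]
    omega
  have h0 : ((PySem.List.pyRange 0 (matrix.length : Int) 1).map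
      (fun j => PySem.List.pyGetD (PySem.List.pyGetD matrix 0 []) j 0)).contains e = true :=
    List.contains_iff_mem.mpr he
  exact (hgen (fun i => ((PySem.List.pyRange 0 (matrix.length : Int) 1).map
    (fun j => PySem.List.pyGetD (PySem.List.pyGetD matrix i []) j 0)).contains e) h0).symm
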